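-- pv_equiv track=rewrite | github.com/victoriademina/leetcode | src/leetcode/binary_number_with_alternating_bits.py | binary_number
-- ===== SOURCE A (Python) =====
-- def binary_number(n):
--     bits = bin(n)
--     count = 0
--     for x in range(len(bits) - 1):
--         if bits[x] == bits[x + 1]:
--             count = count + 1
--     if count > 0:
--         return False
--     else:
--         return True
-- ===== SOURCE B (Python) =====
-- def binary_number(n):
--     m = n if n >= 0 else -n
--     x = m ^ (m >> 1)
--     return x & (x + 1) == 0
-- ===== Notes on version B (the rewrite author's own statement) =====
-- stated objective: idiomatic
-- what changed: Replaces the character loop over the bin(n) string with the closed-form bit trick: x = |n| ^ (|n| >> 1) and return x & (x+1) == 0, no string and no loop.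
import Mathlib
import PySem

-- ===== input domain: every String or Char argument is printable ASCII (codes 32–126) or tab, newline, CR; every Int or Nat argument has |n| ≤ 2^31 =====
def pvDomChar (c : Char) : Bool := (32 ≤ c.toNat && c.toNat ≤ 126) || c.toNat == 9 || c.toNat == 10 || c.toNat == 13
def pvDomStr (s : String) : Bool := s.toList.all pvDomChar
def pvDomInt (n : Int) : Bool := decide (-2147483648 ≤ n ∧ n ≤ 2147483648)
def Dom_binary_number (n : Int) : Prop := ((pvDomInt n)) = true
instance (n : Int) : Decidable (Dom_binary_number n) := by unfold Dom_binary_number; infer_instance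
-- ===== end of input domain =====

-- B replaces A's character loop over the bin(n) string with the closed-form bit trick
-- x = |n| ^ (|n| >> 1); x & (x + 1) == 0 — no string and no loop (objective: idiomatic).

-- ===== PORT A =====
-- helper for Python's bin(): the binary digits of m, most significant first ([] for m = 0)
def pvNatBin (m : Nat) : List Char :=
  if _h : m = 0 then []
  else pvNatBin (m / 2) ++ [if m % 2 = 1 then '1' else '0']
decreasing_by exact Nat.div_lt_self (Nat.pos_of_ne_zero _h) one_lt_two

-- bin(n) as a list of characters: optional '-', then "0b", then the digits of |n| (zero renders as "0b0")
def pvBin (n : Int) : List Char :=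
  (if n < 0 then ['-'] else []) ++ ['0', 'b'] ++ (if n = 0 then ['0'] else pvNatBin n.natAbs)

-- A: count adjacent equal characters of bin(n) over range(len(bits)-1); the indexing is exact
-- here (every index produced by the range is in bounds, so pyGetD's default is never used).
def binary_number (n : Int) : Bool :=
  let bits := pvBin n
  let count : Int :=
    (PySem.List.pyRange 0 ((bits.length : Int) - 1) 1).foldl
      (fun count x =>
        if PySem.List.pyGetD bits x ' ' = PySem.List.pyGetD bits (x + 1) ' ' then count + 1
        else count) 0
  if count > 0 then false else true

-- ===== PORT B =====
def binary_number_alt (n : Int) : Bool :=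
  let m : Int := if n ≥ 0 then n else -n
  let x : Int := PySem.Int.bxor m (m >>> (1 : Nat))
  decide (PySem.Int.band x (x + 1) = 0)

-- ===== PRECONDITION & SPEC =====
def Spec_binary_number (n : Int) (out : Bool) : Prop := out = binary_number_alt n
instance (n : Int) (out : Bool) : Decidable (Spec_binary_number n out) := by unfold Spec_binary_number; infer_instance

-- ===== CLAIM (what is proved, stated in full; the proofs are below) =====
def Claim_equal_binary_number : Prop := ∀ (n : Int), Dom_binary_number n → Spec_binary_number n (binary_number n)

-- ===== LEMMAS AND PROOFS =====

-- the common characterisation both programs are reduced to: |n|'s binary digits alternate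
def pvAlt (m : Nat) : Bool :=
  if _h : m < 2 then true
  else decide (m % 2 ≠ m / 2 % 2) && pvAlt (m / 2)
decreasing_by exact Nat.div_lt_self (by omega) one_lt_two

lemma pvAlt_zero : pvAlt 0 = true := by rw [pvAlt]; simp
lemma pvAlt_one : pvAlt 1 = true := by rw [pvAlt]; simp
lemma pvAlt_ge_two (m : Nat) (h : 2 ≤ m) :
    pvAlt m = (decide (m % 2 ≠ m / 2 % 2) && pvAlt (m / 2)) := by
  rw [pvAlt]; simp only [dif_neg (by omega : ¬ m < 2)]

lemma pvNatBin_zero : pvNatBin 0 = [] := by rw [pvNatBin]; simp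

lemma pvNatBin_eq (m : Nat) (h : m ≠ 0) :
    pvNatBin m = pvNatBin (m / 2) ++ [if m % 2 = 1 then '1' else '0'] := by
  rw [pvNatBin]; simp [h]

lemma pvNatBin_ne_nil (m : Nat) (h : m ≠ 0) : pvNatBin m ≠ [] := by
  rw [pvNatBin_eq m h]; simp

lemma chars_pvNatBin (m : Nat) : ∀ c ∈ pvNatBin m, c = '0' ∨ c = '1' := by
  induction m using Nat.strong_induction_on with
  | _ m ih =>
    by_cases h : m = 0
    · subst h; rw [pvNatBin]; simp
    · rw [pvNatBin_eq m h]
      intro c hc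
      rcases List.mem_append.mp hc with hc | hc
      · exact ih (m / 2) (Nat.div_lt_self (Nat.pos_of_ne_zero h) one_lt_two) c hc
      · simp at hc; subst hc; split <;> simp

lemma getLast?_pvNatBin (m : Nat) (h : m ≠ 0) :
    (pvNatBin m).getLast? = some (if m % 2 = 1 then '1' else '0') := by
  rw [pvNatBin_eq m h, List.getLast?_concat]

lemma chain_pvNatBin (m : Nat) (h : m ≠ 0) :
    List.IsChain (· ≠ ·) (pvNatBin m) ↔ pvAlt m = true := by
  induction m using Nat.strong_induction_on with
  | _ m ih =>
    by_cases hq : m / 2 = 0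
    · have hm1 : m = 1 := by omega
      subst hm1
      rw [pvNatBin_eq 1 one_ne_zero, pvNatBin_zero, pvAlt_one]
      exact iff_of_true (by simp) rfl
    · rw [pvNatBin_eq m h, List.isChain_append]
      have hlast := getLast?_pvNatBin (m / 2) hq
      have hih := ih (m / 2) (Nat.div_lt_self (Nat.pos_of_ne_zero h) one_lt_two) hq
      rw [pvAlt_ge_two m (by omega)]
      constructor
      · rintro ⟨h1, -, h3⟩
        have hne := h3 (if m / 2 % 2 = 1 then '1' else '0') (by rw [hlast]; simp)
          (if m % 2 = 1 then '1' else '0') (by simp)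
        simp only [Bool.and_eq_true, decide_eq_true_iff]
        refine ⟨?_, hih.mp h1⟩
        intro heq
        rw [heq] at hne
        exact hne rfl
      · intro hb
        simp only [Bool.and_eq_true, decide_eq_true_iff] at hb
        refine ⟨hih.mpr hb.2, List.isChain_singleton _, ?_⟩
        intro x hx y hy
        rw [hlast] at hx
        simp at hx hy
        subst hx; subst hy
        have := hb.1
        rcases Nat.mod_two_eq_zero_or_one m with h1 | h1 <;>
          rcases Nat.mod_two_eq_zero_or_one (m / 2) with h2 | h2 <;>
          simp [h1, h2] at this ⊢

lemma chain_pvBin (n : Int) :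
    List.IsChain (· ≠ ·) (pvBin n) ↔ pvAlt n.natAbs = true := by
  unfold pvBin
  by_cases h0 : n = 0
  · subst h0
    rw [show (0:Int).natAbs = 0 from rfl, pvAlt_zero,
      if_pos rfl, if_neg (by omega : ¬ (0:Int) < 0), List.nil_append]
    refine iff_of_true ?_ rfl
    rw [show (['0', 'b'] ++ ['0'] : List Char) = ['0', 'b', '0'] from rfl,
      List.isChain_cons_cons, List.isChain_cons_cons]
    exact ⟨by decide, by decide, List.isChain_singleton _⟩
  · have hds : (if n = 0 then ['0'] else pvNatBin n.natAbs) = pvNatBin n.natAbs := by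
      simp [h0]
    rw [hds, ← chain_pvNatBin n.natAbs (by omega)]
    have hne : pvNatBin n.natAbs ≠ [] := pvNatBin_ne_nil _ (by omega)
    obtain ⟨d, t, hdt⟩ := List.exists_cons_of_ne_nil hne
    have hd01 : d = '0' ∨ d = '1' := chars_pvNatBin n.natAbs d (by rw [hdt]; simp)
    have hdb : 'b' ≠ d := by rcases hd01 with rfl | rfl <;> decide
    rw [hdt]
    by_cases hneg : n < 0
    · simp only [if_pos hneg, List.cons_append, List.nil_append, List.isChain_cons_cons]
      constructor
      · rintro ⟨-, -, -, hc⟩; exact hc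
      · intro hc; exact ⟨by decide, by decide, hdb, hc⟩
    · simp only [if_neg hneg, List.cons_append, List.nil_append, List.isChain_cons_cons]
      constructor
      · rintro ⟨-, -, hc⟩; exact hc
      · intro hc; exact ⟨by decide, hdb, hc⟩

-- the loop of A counts the indices at which adjacent characters are equal
lemma foldl_if_count (l : List Char) (L : List Int) (c : Int) :
    L.foldl
      (fun count x =>
        if PySem.List.pyGetD l x ' ' = PySem.List.pyGetD l (x + 1) ' ' then count + 1
        else count) c
      = c + L.countP
          (fun x => decide (PySem.List.pyGetD l x ' ' = PySem.List.pyGetD l (x + 1) ' ')) := by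
  induction L generalizing c with
  | nil => simp
  | cons a L ih =>
    rw [List.foldl_cons, List.countP_cons, ih]
    simp only [decide_eq_true_eq]
    split_ifs with hp <;> push_cast <;> ring

lemma adj_iff_chain (l : List Char) :
    (∀ x ∈ PySem.List.pyRange 0 ((l.length : Int) - 1) 1,
        ¬ PySem.List.pyGetD l x ' ' = PySem.List.pyGetD l (x + 1) ' ')
      ↔ List.IsChain (· ≠ ·) l := by
  rw [List.isChain_iff_getElem]
  constructor
  · intro h i hi
    have hx := h (i : Int) (by rw [PySem.List.mem_pyRange_one]; omega)
    rw [show ((i : Int) + 1) = ((i + 1 : Nat) : Int) by push_cast; ring] at hx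
    rw [PySem.List.pyGetD_natCast, PySem.List.pyGetD_natCast,
      List.getD_eq_getElem l ' ' (by omega), List.getD_eq_getElem l ' ' (by omega)] at hx
    exact hx
  · intro h x hx
    rw [PySem.List.mem_pyRange_one] at hx
    rw [show x = ((x.toNat : Nat) : Int) by omega,
      show ((x.toNat : Int) + 1) = ((x.toNat + 1 : Nat) : Int) by push_cast; ring,
      PySem.List.pyGetD_natCast, PySem.List.pyGetD_natCast,
      List.getD_eq_getElem l ' ' (by omega), List.getD_eq_getElem l ' ' (by omega)]
    exact h x.toNat (by omega)

lemma A_true_iff (n : Int) :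
    binary_number n = true ↔ List.IsChain (· ≠ ·) (pvBin n) := by
  unfold binary_number
  simp only [foldl_if_count, zero_add]
  rw [← adj_iff_chain (pvBin n)]
  have hcount : (∀ x ∈ PySem.List.pyRange 0 (((pvBin n).length : Int) - 1) 1,
      ¬ PySem.List.pyGetD (pvBin n) x ' ' = PySem.List.pyGetD (pvBin n) (x + 1) ' ')
      ↔ ((PySem.List.pyRange 0 (((pvBin n).length : Int) - 1) 1).countP
          (fun x => decide (PySem.List.pyGetD (pvBin n) x ' '
            = PySem.List.pyGetD (pvBin n) (x + 1) ' '))) = 0 := by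
    rw [List.countP_eq_zero]; simp
  rw [hcount]
  constructor
  · intro hif
    by_contra hC
    have hpos : (0 : Int) <
        ((PySem.List.pyRange 0 (((pvBin n).length : Int) - 1) 1).countP
          (fun x => decide (PySem.List.pyGetD (pvBin n) x ' '
            = PySem.List.pyGetD (pvBin n) (x + 1) ' ')) : Int) := by
      exact_mod_cast Nat.pos_of_ne_zero hC
    rw [if_pos hpos] at hif
    exact Bool.false_ne_true hif
  · intro hC
    rw [hC]
    simp

-- ── B-side: bit lemmas ──
lemma pv_xor_step (q b : Nat) (hb : b < 2) :
    (2*q + b) ^^^ q = 2*(q ^^^ (q/2)) + (b ^^^ (q % 2)) := by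
  apply Nat.eq_of_testBit_eq
  intro i
  cases i with
  | zero =>
    rw [Nat.testBit_xor, Nat.testBit_zero, Nat.testBit_zero, Nat.testBit_zero]
    rcases (by omega : b = 0 ∨ b = 1) with rfl | rfl <;>
      rcases Nat.mod_two_eq_zero_or_one q with h | h <;>
      simp [h]
  | succ i =>
    have h1 : (2*q + b) / 2 = q := by omega
    have hc : (b ^^^ q % 2) < 2 := by
      rcases (by omega : b = 0 ∨ b = 1) with rfl | rfl <;>
        rcases Nat.mod_two_eq_zero_or_one q with h | h <;> simp [h]
    have h2 : (2*(q ^^^ q/2) + (b ^^^ q % 2)) / 2 = q ^^^ q/2 := by omega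
    rw [Nat.testBit_xor, Nat.testBit_succ, Nat.testBit_succ, Nat.testBit_succ, h1, h2,
      Nat.testBit_xor]

lemma pv_ones_odd (z : Nat) : (2*z+1) &&& (2*z+2) = 2*(z &&& (z+1)) := by
  apply Nat.eq_of_testBit_eq
  intro i
  cases i with
  | zero =>
    rw [Nat.testBit_and, Nat.testBit_zero, Nat.testBit_zero, Nat.testBit_zero]
    simp
  | succ i =>
    have h1 : (2*z+1)/2 = z := by omega
    have h2 : (2*z+2)/2 = z+1 := by omega
    have h3 : (2*(z &&& (z+1)))/2 = z &&& (z+1) := by omega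
    rw [Nat.testBit_and, Nat.testBit_succ, Nat.testBit_succ, Nat.testBit_succ, h1, h2, h3,
      Nat.testBit_and]

lemma pv_ones_even (z : Nat) : (2*z) &&& (2*z+1) = 2*z := by
  apply Nat.eq_of_testBit_eq
  intro i
  cases i with
  | zero =>
    rw [Nat.testBit_and, Nat.testBit_zero, Nat.testBit_zero]
    simp
  | succ i =>
    have h1 : (2*z)/2 = z := by omega
    have h2 : (2*z+1)/2 = z := by omega
    rw [Nat.testBit_and, Nat.testBit_succ, Nat.testBit_succ, h1, h2]
    simp

lemma pv_xor_half_ne_zero (q : Nat) (h : q ≠ 0) : (q ^^^ q/2) ≠ 0 := by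
  intro h0
  have := Nat.xor_eq_zero_iff.mp h0
  omega

lemma pv_ones_alt (m : Nat) :
    ((m ^^^ m/2) &&& ((m ^^^ m/2) + 1) = 0) ↔ pvAlt m = true := by
  induction m using Nat.strong_induction_on with
  | _ m ih =>
    by_cases h0 : m = 0
    · subst h0; rw [pvAlt_zero]; simp
    · by_cases h1 : m = 1
      · subst h1; rw [pvAlt_one]; simp
      · have hq : m / 2 ≠ 0 := by omega
        have hm : m = 2 * (m / 2) + m % 2 := by omega
        have hx : m ^^^ m/2 = 2*((m/2) ^^^ (m/2)/2) + (m % 2 ^^^ (m/2) % 2) := by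
          conv_lhs => rw [hm]
          rw [show (2 * (m / 2) + m % 2) / 2 = m / 2 by omega]
          exact pv_xor_step (m/2) (m % 2) (by omega)
        have hih := ih (m/2) (by omega)
        have hXne := pv_xor_half_ne_zero (m/2) hq
        rw [pvAlt_ge_two m (by omega), hx]
        rcases Nat.mod_two_eq_zero_or_one m with hb | hb <;>
          rcases Nat.mod_two_eq_zero_or_one (m/2) with hb2 | hb2 <;> rw [hb, hb2]
        · rw [show ((0:Nat) ^^^ 0) = 0 by decide, Nat.add_zero, pv_ones_even]
          exact iff_of_false (fun hc => hXne (by omega)) (by simp)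
        · rw [show ((0:Nat) ^^^ 1) = 1 by decide,
            show 2*((m/2) ^^^ (m/2)/2) + 1 + 1 = 2*((m/2) ^^^ (m/2)/2) + 2 by ring,
            pv_ones_odd]
          constructor
          · intro hc
            simp only [Bool.and_eq_true, decide_eq_true_iff]
            exact ⟨by omega, hih.mp (by omega)⟩
          · intro hc
            simp only [Bool.and_eq_true] at hc
            have := hih.mpr hc.2
            omega
        · rw [show ((1:Nat) ^^^ 0) = 1 by decide,
            show 2*((m/2) ^^^ (m/2)/2) + 1 + 1 = 2*((m/2) ^^^ (m/2)/2) + 2 by ring,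
            pv_ones_odd]
          constructor
          · intro hc
            simp only [Bool.and_eq_true, decide_eq_true_iff]
            exact ⟨by omega, hih.mp (by omega)⟩
          · intro hc
            simp only [Bool.and_eq_true] at hc
            have := hih.mpr hc.2
            omega
        · rw [show ((1:Nat) ^^^ 1) = 0 by decide, Nat.add_zero, pv_ones_even]
          exact iff_of_false (fun hc => hXne (by omega)) (by simp)

lemma B_true_iff (n : Int) :
    binary_number_alt n = true
      ↔ ((n.natAbs ^^^ n.natAbs/2) &&& ((n.natAbs ^^^ n.natAbs/2) + 1) = 0) := by
  unfold binary_number_alt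
  have hm : (if n ≥ 0 then n else -n) = (n.natAbs : Int) := by split <;> omega
  have hsh : ((n.natAbs : Int) >>> (1 : Nat)) = ((n.natAbs / 2 : Nat) : Int) := by
    rw [Int.shiftRight_eq_div_pow]; push_cast; norm_num
  have hc : (((n.natAbs ^^^ n.natAbs/2 : Nat) : Int) + 1)
      = (((n.natAbs ^^^ n.natAbs/2) + 1 : Nat) : Int) := by push_cast; ring
  simp only [hm, hsh, PySem.Int.bxor_natCast, hc, PySem.Int.band_natCast]
  simp

-- ===== VERDICT (by name: the statement is the Claim_ definition above) =====
theorem binary_number_spec : Claim_equal_binary_number := by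
  intro n _
  unfold Spec_binary_number
  have hA := (A_true_iff n).trans ((chain_pvBin n).trans (pv_ones_alt n.natAbs).symm)
  have hB := B_true_iff n
  cases hA' : binary_number n <;> cases hB' : binary_number_alt n <;> simp_all
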